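-- pv_equiv track=rewrite | github.com/triplelog/blind-predictions | seam-carving/shptodata.py | getcd
-- ===== SOURCE A (Python) =====
-- def getcd(fileData):
-- 	tractToCD = {}
-- 	for i in fileData:
-- 		countyRaw3 = '00'+str(i[2])
-- 		countyId = countyRaw3[-3:]
-- 		tractRaw3 = '00000'+str(i[1])
-- 		dotIndex = i[1].find('.')
-- 		if dotIndex > -1:
-- 			tractId = tractRaw3[-9:-3]
-- 		else:
-- 			tractId = tractRaw3[-6:]
-- 		geoid = countyId+tractId
-- 		if geoid not in tractToCD.keys():
-- 			tractToCD[geoid]=[i[3]]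
-- 		else:
-- 			tractToCD[geoid].append(i[3])
-- 	return tractToCD
-- ===== SOURCE B (Python) =====
-- def _geoid(i):
-- 	countyId = ('00'+str(i[2]))[-3:]
-- 	tractRaw3 = '00000'+str(i[1])
-- 	if i[1].find('.') > -1:
-- 		return countyId + tractRaw3[-9:-3]
-- 	return countyId + tractRaw3[-6:]
--
-- def getcd(fileData):
-- 	pairs = [(_geoid(i), i[3]) for i in fileData]
-- 	return {g: [v for (h, v) in pairs if h == g]
-- 			for g in dict.fromkeys(h for (h, _) in pairs)}
-- ===== Notes on version B (the rewrite author's own statement) =====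
-- stated objective: alternative
-- what changed: Replaces the online dict membership-test/append aggregation with a two-phase pass: map every record to a (geoid, value) pair once, then group by the first-occurrence-ordered distinct keys with a filtering comprehension.
import Mathlib
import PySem

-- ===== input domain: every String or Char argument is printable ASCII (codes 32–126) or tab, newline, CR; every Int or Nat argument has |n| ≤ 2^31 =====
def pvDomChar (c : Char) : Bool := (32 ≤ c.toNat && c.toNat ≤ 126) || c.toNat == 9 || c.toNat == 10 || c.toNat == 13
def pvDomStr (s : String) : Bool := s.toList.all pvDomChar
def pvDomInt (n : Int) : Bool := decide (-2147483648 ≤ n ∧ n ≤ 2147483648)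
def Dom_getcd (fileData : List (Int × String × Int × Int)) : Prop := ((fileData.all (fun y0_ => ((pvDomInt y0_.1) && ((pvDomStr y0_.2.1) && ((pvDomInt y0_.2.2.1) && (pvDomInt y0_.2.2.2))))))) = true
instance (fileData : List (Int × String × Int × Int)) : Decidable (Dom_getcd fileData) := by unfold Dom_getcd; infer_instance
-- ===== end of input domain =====

-- B groups by a one-shot (geoid, value) pair list and first-occurrence-ordered distinct keys
-- instead of A's online dict membership-test/append loop; objective: alternative decomposition.

-- ===== PORT A =====
def getcd (fileData : List (Int × String × Int × Int)) : List (String × List Int) :=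
  (fileData.foldl (fun tractToCD i =>
      let countyRaw3 := "00".toList ++ (PySem.Int.toStr i.2.2.1).toList
      let countyId := PySem.List.slice countyRaw3 (some (-3)) none
      let tractRaw3 := "00000".toList ++ i.2.1.toList
      let dotIndex := PySem.Str.find i.2.1 "."
      let tractId := if dotIndex > -1 then PySem.List.slice tractRaw3 (some (-9)) (some (-3))
        else PySem.List.slice tractRaw3 (some (-6)) none
      let geoid := String.ofList (countyId ++ tractId)
      if tractToCD.contains geoid = false then tractToCD.insert geoid [i.2.2.2]
      else tractToCD.insert geoid (tractToCD.getD geoid [] ++ [i.2.2.2]))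
    PySem.Dict.empty).items

-- ===== PORT B =====
def pvGeoid (i : Int × String × Int × Int) : String :=
  let countyRaw3 := "00".toList ++ (PySem.Int.toStr i.2.2.1).toList
  let countyId := PySem.List.slice countyRaw3 (some (-3)) none
  let tractRaw3 := "00000".toList ++ i.2.1.toList
  let dotIndex := PySem.Str.find i.2.1 "."
  let tractId := if dotIndex > -1 then PySem.List.slice tractRaw3 (some (-9)) (some (-3))
    else PySem.List.slice tractRaw3 (some (-6)) none
  String.ofList (countyId ++ tractId)

def getcd_alt (fileData : List (Int × String × Int × Int)) : List (String × List Int) :=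
  let pairs := fileData.map (fun i => (pvGeoid i, i.2.2.2))
  (PySem.List.dedup (pairs.map (·.1))).map
    (fun g => (g, (pairs.filter (fun p => p.1 == g)).map (·.2)))

-- ===== PRECONDITION & SPEC =====
def Spec_getcd (fileData : List (Int × String × Int × Int)) (out : List (String × List Int)) : Prop := out = getcd_alt fileData
instance (fileData : List (Int × String × Int × Int)) (out : List (String × List Int)) : Decidable (Spec_getcd fileData out) := by unfold Spec_getcd; infer_instance

-- ===== CLAIM (what is proved, stated in full; the proofs are below) =====
def Claim_equal_getcd : Prop := ∀ (fileData : List (Int × String × Int × Int)), Dom_getcd fileData → Spec_getcd fileData (getcd fileData)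

-- ===== LEMMAS AND PROOFS =====

-- A's loop body, over the (geoid, value) pair
def pvStep (d : PySem.Dict String (List Int)) (p : String × Int) : PySem.Dict String (List Int) :=
  if d.contains p.1 = false then d.insert p.1 [p.2]
  else d.insert p.1 (d.getD p.1 [] ++ [p.2])

lemma pvStep_eq_insert : pvStep = fun d p =>
    d.insert p.1 (if d.contains p.1 = false then [p.2] else d.getD p.1 [] ++ [p.2]) := by
  funext d p
  by_cases h : d.contains p.1 = false <;> simp [pvStep, h]

lemma getcd_eq_fold (fileData : List (Int × String × Int × Int)) :
    getcd fileData = ((fileData.map (fun i => (pvGeoid i, i.2.2.2))).foldl pvStep PySem.Dict.empty).items := by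
  rw [List.foldl_map]
  rfl

lemma getD_pvStep_fold (l : List (String × Int)) (d : PySem.Dict String (List Int)) (c : String) :
    (l.foldl pvStep d).getD c [] = d.getD c [] ++ (l.filter (fun p => p.1 == c)).map (·.2) := by
  induction l generalizing d with
  | nil => simp
  | cons p l ih =>
    have hstep : (pvStep d p).getD c [] = d.getD c [] ++ (if p.1 == c then [p.2] else []) := by
      by_cases hc : p.1 = c
      · subst hc
        by_cases h : d.contains p.1 = false
        · simp [pvStep, h, PySem.Dict.getD_insert_self, PySem.Dict.getD_of_not_contains d [] h]
        · simp [pvStep, h, PySem.Dict.getD_insert_self]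
      · have hcc : c ≠ p.1 := fun h => hc h.symm
        by_cases h : d.contains p.1 = false <;>
          simp [pvStep, h, PySem.Dict.getD_insert_of_ne d _ _ hcc, hc]
    simp only [List.foldl_cons, ih, hstep, List.filter_cons]
    by_cases hc : p.1 = c <;> simp [hc]
  
theorem getcd_spec_aux (fileData : List (Int × String × Int × Int)) :
    getcd fileData = getcd_alt fileData := by
  rw [getcd_eq_fold, getcd_alt]
  set pairs := fileData.map (fun i => (pvGeoid i, i.2.2.2)) with hp
  rw [pvStep_eq_insert]
  have hnd : ((pairs.foldl (fun d p =>
      d.insert p.1 (if d.contains p.1 = false then [p.2] else d.getD p.1 [] ++ [p.2])) PySem.Dict.empty)).keys.Nodup :=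
    PySem.Dict.nodup_keys_foldl_insert_key pairs (·.1) _ _ PySem.Dict.nodup_keys_empty
  rw [PySem.Dict.items_eq_map_keys _ hnd []]
  rw [PySem.Dict.keys_foldl_insert_key]
  rw [← pvStep_eq_insert]
  have hkeys : PySem.Set.update (PySem.Dict.empty : PySem.Dict String (List Int)).keys (pairs.map (·.1))
      = PySem.List.dedup (pairs.map (·.1)) := by
    have := PySem.Set.ofList_append (xs := ([] : List String)) (ys := pairs.map (·.1))
    simp [PySem.Set.ofList_nil, PySem.Dict.keys_empty] at this ⊢
    exact this.symm
  rw [hkeys]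
  apply List.map_congr_left
  intro g _
  rw [getD_pvStep_fold]
  simp
-- ===== VERDICT (by name: the statement is the Claim_ definition above) =====
theorem getcd_spec : Claim_equal_getcd := by
  intro fileData _
  unfold Spec_getcd
  exact getcd_spec_aux fileData
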